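-- pv_equiv track=rewrite | github.com/vasanthkumar7/Algorithm-visualizer | insertion_sort_.py | getcolorarray
-- ===== SOURCE A (Python) =====
-- def getcolorarray(a,l,mins):
--     colorarray=[]
--
--     for i in range(len(a)):
--         if i!=mins and i<=l:
--             colorarray.append("green")
--         elif i==mins:
--             colorarray.append("white")
--         else:
--             colorarray.append("red")
--
--     return colorarray
-- ===== SOURCE B (Python) =====
-- def getcolorarray(a, l, mins):
--     n = len(a)
--     k = min(max(l + 1, 0), n)
--     colorarray = ["red"] * n
--     colorarray[:k] = ["green"] * k
--     if 0 <= mins < n: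
--         colorarray[mins] = "white"
--     return colorarray
-- ===== Notes on version B (the rewrite author's own statement) =====
-- stated objective: simpler
-- what changed: Replaces the per-index three-way if/elif/else classification loop by a default red fill, a clamped green slice assignment for the prefix, and a single guarded white overwrite.
import Mathlib
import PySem

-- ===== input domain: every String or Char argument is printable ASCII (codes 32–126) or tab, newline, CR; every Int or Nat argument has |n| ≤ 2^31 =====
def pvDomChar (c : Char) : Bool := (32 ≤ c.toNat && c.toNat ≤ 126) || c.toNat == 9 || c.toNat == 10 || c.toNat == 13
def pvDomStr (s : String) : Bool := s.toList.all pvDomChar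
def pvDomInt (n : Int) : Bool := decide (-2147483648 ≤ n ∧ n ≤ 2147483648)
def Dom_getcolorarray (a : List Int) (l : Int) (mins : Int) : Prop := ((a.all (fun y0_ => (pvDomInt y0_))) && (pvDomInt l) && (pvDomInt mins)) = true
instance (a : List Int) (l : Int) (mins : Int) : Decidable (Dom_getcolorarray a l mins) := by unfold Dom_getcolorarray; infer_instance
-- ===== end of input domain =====

-- B replaces A's per-index three-way classification loop by a default red fill, a green slice
-- assignment for the clamped prefix and one white overwrite (objective: simpler decomposition).

-- ===== PORT A =====
def getcolorarray (a : List Int) (l : Int) (mins : Int) : List String :=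
  (PySem.List.pyRange 0 a.length 1).foldl (fun colorarray i =>
    if i ≠ mins ∧ i ≤ l then colorarray ++ ["green"]
    else if i = mins then colorarray ++ ["white"]
    else colorarray ++ ["red"]) []

-- ===== PORT B =====
def getcolorarray_alt (a : List Int) (l : Int) (mins : Int) : List String :=
  let n : Int := a.length
  let k : Int := min (max (l + 1) 0) n
  -- colorarray = ["red"] * n; colorarray[:k] = ["green"] * k  (slice assignment, k clamped to [0,n])
  let colorarray := List.replicate k.toNat "green" ++ (List.replicate a.length "red").drop k.toNat
  if 0 ≤ mins ∧ mins < n then colorarray.set mins.toNat "white" else colorarray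

-- ===== PRECONDITION & SPEC =====
def Spec_getcolorarray (a : List Int) (l : Int) (mins : Int) (out : List String) : Prop := out = getcolorarray_alt a l mins
instance (a : List Int) (l : Int) (mins : Int) (out : List String) : Decidable (Spec_getcolorarray a l mins out) := by unfold Spec_getcolorarray; infer_instance

-- ===== CLAIM (what is proved, stated in full; the proofs are below) =====
def Claim_equal_getcolorarray : Prop := ∀ (a : List Int) (l : Int) (mins : Int), Dom_getcolorarray a l mins → Spec_getcolorarray a l mins (getcolorarray a l mins)

-- ===== LEMMAS AND PROOFS =====

theorem foldl_snoc {α β : Type} (g : α → β) (xs : List α) (init : List β) :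
    xs.foldl (fun acc i => acc ++ [g i]) init = init ++ xs.map g := by
  induction xs generalizing init with
  | nil => simp
  | cons x xs ih => simp [List.foldl_cons, ih]

theorem getcolorarray_eq_map (a : List Int) (l : Int) (mins : Int) :
    getcolorarray a l mins = (List.range a.length).map (fun (j : ℕ) =>
      if (j : Int) ≠ mins ∧ (j : Int) ≤ l then "green"
      else if (j : Int) = mins then "white" else "red") := by
  unfold getcolorarray
  have hbody : (fun (colorarray : List String) (i : Int) =>
      if i ≠ mins ∧ i ≤ l then colorarray ++ ["green"]
      else if i = mins then colorarray ++ ["white"]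
      else colorarray ++ ["red"]) =
      (fun acc i => acc ++ [if i ≠ mins ∧ i ≤ l then "green"
        else if i = mins then "white" else "red"]) := by
    funext acc i; split_ifs <;> rfl
  rw [hbody, foldl_snoc, PySem.List.pyRange_one]
  simp only [List.nil_append, List.map_map, Int.sub_zero, Int.toNat_natCast]
  exact List.map_congr_left (fun k _ => by simp)

theorem getcolorarray_spec_aux (a : List Int) (l : Int) (mins : Int) :
    getcolorarray a l mins = getcolorarray_alt a l mins := by
  rw [getcolorarray_eq_map]
  unfold getcolorarray_alt
  dsimp only
  rw [List.drop_replicate]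
  set k : ℕ := (min (max (l + 1) 0) (a.length : Int)).toNat with hkdef
  have hk : k ≤ a.length := by omega
  apply List.ext_getElem
  · split_ifs <;> simp <;> omega
  · intro j h1 h2
    have hj : j < a.length := by simpa using h1
    have hjk : (j < k) ↔ ((j : Int) ≤ l) := by omega
    split_ifs with hmins
    · rw [List.getElem_set]
      by_cases hje : mins.toNat = j
      · have hjm : (j : Int) = mins := by omega
        simp [hje, hjm]
      · have hne : (j : Int) ≠ mins := by omega
        simp only [hje, if_false]
        rw [List.getElem_map, List.getElem_range]
        by_cases hg : j < k
        · rw [List.getElem_append_left (by simpa using hg)]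
          simp [hne, hjk.mp hg]
        · rw [List.getElem_append_right (by simpa using hg)]
          have hnl : ¬ ((j : Int) ≤ l) := fun h => hg (hjk.mpr h)
          simp [hne, hnl]
    · have hne : (j : Int) ≠ mins := by omega
      rw [List.getElem_map, List.getElem_range]
      by_cases hg : j < k
      · rw [List.getElem_append_left (by simpa using hg)]
        simp [hne, hjk.mp hg]
      · rw [List.getElem_append_right (by simpa using hg)]
        have hnl : ¬ ((j : Int) ≤ l) := fun h => hg (hjk.mpr h)
        simp [hne, hnl]

-- ===== VERDICT (by name: the statement is the Claim_ definition above) =====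
theorem getcolorarray_spec : Claim_equal_getcolorarray := by
  intro a l mins _
  exact getcolorarray_spec_aux a l mins
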